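-- pv_equiv track=rewrite | github.com/TaeBeomShin/1day-1ps | 10. 이외 알고리즘/17609.py | semipelindrom
-- ===== SOURCE A (Python) =====
-- def semipelindrom(word):
--     front,back=True,True
--     check=False
--     left,right=0,len(word)-1
--     while(left<=right):
--         if(word[left]!=word[right]):
--             if not check:
--                 check=True
--                 right-=1
--             else:
--                 back=False
--                 break
--         else:
--             left+=1;right-=1
--
--     check = False
--     left, right = 0, len(word) - 1
--     while(left<=right):
--         if (word[left] != word[right]):
--             if not check:
--                 check = True
--                 left += 1
--             else:
--                 front = False
--                 break
--         else:
--             left += 1;right -= 1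
--
--     return front or back
-- ===== SOURCE B (Python) =====
-- def semipelindrom(word):
--     n = len(word)
--     for i in range(n // 2):
--         j = n - 1 - i
--         if word[i] != word[j]:
--             a = word[i + 1:j + 1]
--             b = word[i:j]
--             return a == a[::-1] or b == b[::-1]
--     return True
-- ===== Notes on version B (the rewrite author's own statement) =====
-- stated objective: simpler
-- what changed: Replaces A's two full skip-tolerant two-pointer scans with one indexed loop over range(n//2) that stops at the first mismatch and then decides by slicing out the two candidate substrings and comparing each with its [::-1] reversal (no second tolerant scan, no pointer state machine).
import Mathlib
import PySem

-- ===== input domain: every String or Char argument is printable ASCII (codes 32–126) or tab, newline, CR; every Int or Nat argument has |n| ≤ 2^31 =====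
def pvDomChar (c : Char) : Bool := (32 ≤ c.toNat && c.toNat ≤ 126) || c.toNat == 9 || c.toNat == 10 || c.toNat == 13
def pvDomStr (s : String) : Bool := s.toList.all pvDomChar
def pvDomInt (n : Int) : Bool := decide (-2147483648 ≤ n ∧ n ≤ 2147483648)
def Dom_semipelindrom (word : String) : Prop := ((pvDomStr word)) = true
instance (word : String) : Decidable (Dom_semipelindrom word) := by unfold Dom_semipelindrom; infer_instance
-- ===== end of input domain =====

-- B replaces A's two full skip-tolerant pointer scans by one indexed loop to the
-- first mismatch plus two slice-and-reverse comparisons (objective: simpler).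

-- ===== PORT A =====
-- A's first while-loop ("back"): on a mismatch with check still unset, skip the
-- right character (right -= 1) and remember it; a second mismatch breaks with False.
-- Indices stay in [0, len-1] throughout, so `(pyGet? …).getD ' '` is exact here
-- (the default is never used where Python would not raise).
def pvLoopBack (cs : List Char) (l r : Int) (check : Bool) : Bool :=
  if l ≤ r then
    if (PySem.List.pyGet? cs l).getD ' ' ≠ (PySem.List.pyGet? cs r).getD ' ' then
      if !check then pvLoopBack cs l (r - 1) true
      else false
    else pvLoopBack cs (l + 1) (r - 1) check
  else true
termination_by (r + 1 - l).toNat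
decreasing_by all_goals (simp at *; omega)

-- A's second while-loop ("front"): same, but skips the left character (left += 1).
def pvLoopFront (cs : List Char) (l r : Int) (check : Bool) : Bool :=
  if l ≤ r then
    if (PySem.List.pyGet? cs l).getD ' ' ≠ (PySem.List.pyGet? cs r).getD ' ' then
      if !check then pvLoopFront cs (l + 1) r true
      else false
    else pvLoopFront cs (l + 1) (r - 1) check
  else true
termination_by (r + 1 - l).toNat
decreasing_by all_goals (simp at *; omega)

def semipelindrom (word : String) : Bool :=
  let cs := word.toList
  let back := pvLoopBack cs 0 ((cs.length : Int) - 1) false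
  let front := pvLoopFront cs 0 ((cs.length : Int) - 1) false
  front || back

-- ===== PORT B =====
-- Source B's for-loop over range(n // 2): at the first mismatch at index i (partner
-- j = n-1-i) return a == a[::-1] or b == b[::-1] for the slices a = word[i+1:j+1],
-- b = word[i:j]; if the loop finishes, return True.  Strings are carried as
-- List Char: Python string slicing is PySem.List.slice on the code points and
-- s[::-1] is List.reverse (PySem.Str.slice?_none_none_neg_one), both exact.
-- (the Python locals j, a, b are inlined: j = n-1-i, a = word[i+1:j+1], b = word[i:j])
def pvLoopB (cs : List Char) (n i : Int) : Bool :=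
  if i < PySem.Int.floordiv n 2 then
    if (PySem.List.pyGet? cs i).getD ' ' ≠ (PySem.List.pyGet? cs (n - 1 - i)).getD ' ' then
      (PySem.List.slice cs (some (i + 1)) (some (n - 1 - i + 1))
        == (PySem.List.slice cs (some (i + 1)) (some (n - 1 - i + 1))).reverse)
      || (PySem.List.slice cs (some i) (some (n - 1 - i))
        == (PySem.List.slice cs (some i) (some (n - 1 - i))).reverse)
    else pvLoopB cs n (i + 1)
  else true
termination_by (PySem.Int.floordiv n 2 - i).toNat
decreasing_by simp at *; omega

def semipelindrom_alt (word : String) : Bool :=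
  let cs := word.toList
  pvLoopB cs (cs.length : Int) 0

-- ===== PRECONDITION & SPEC =====
def Spec_semipelindrom (word : String) (out : Bool) : Prop := out = semipelindrom_alt word
instance (word : String) (out : Bool) : Decidable (Spec_semipelindrom word out) := by unfold Spec_semipelindrom; infer_instance

-- ===== CLAIM (what is proved, stated in full; the proofs are below) =====
def Claim_equal_semipelindrom : Prop := ∀ (word : String), Dom_semipelindrom word → Spec_semipelindrom word (semipelindrom word)

-- ===== LEMMAS AND PROOFS =====

-- Proof-only helper: plain two-pointer palindrome test of cs[l..r].
def pvIsPal (cs : List Char) (l r : Int) : Bool :=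
  if l ≤ r then
    if (PySem.List.pyGet? cs l).getD ' ' ≠ (PySem.List.pyGet? cs r).getD ' ' then false
    else pvIsPal cs (l + 1) (r - 1)
  else true
termination_by (r + 1 - l).toNat
decreasing_by all_goals (simp at *; omega)

-- Once a skip has been used, either of A's loops is a plain palindrome check.
theorem pvLoopBack_true (cs : List Char) (l r : Int) :
    pvLoopBack cs l r true = pvIsPal cs l r := by
  fun_induction pvIsPal cs l r with
  | case1 l r hle hne =>
      rw [pvLoopBack]; simp only [if_pos hle, if_pos hne, Bool.not_true, if_neg Bool.false_ne_true]
  | case2 l r hle hne ih =>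
      rw [pvLoopBack]; rw [if_pos hle, if_neg hne]; exact ih
  | case3 l r hle =>
      rw [pvLoopBack]; rw [if_neg hle]

theorem pvLoopFront_true (cs : List Char) (l r : Int) :
    pvLoopFront cs l r true = pvIsPal cs l r := by
  fun_induction pvIsPal cs l r with
  | case1 l r hle hne =>
      rw [pvLoopFront]; simp only [if_pos hle, if_pos hne, Bool.not_true, if_neg Bool.false_ne_true]
  | case2 l r hle hne ih =>
      rw [pvLoopFront]; rw [if_pos hle, if_neg hne]; exact ih
  | case3 l r hle =>
      rw [pvLoopFront]; rw [if_neg hle]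

-- cons/concat characterisation of "equals its own reverse".
theorem pal_cons_concat (x y : Char) (m : List Char) :
    (x :: (m ++ [y]) = (x :: (m ++ [y])).reverse) ↔ (x = y ∧ m = m.reverse) := by
  rw [show (x :: (m ++ [y])).reverse = y :: (m.reverse ++ [x]) by simp, List.cons_eq_cons]
  constructor
  · rintro ⟨hxy, ht⟩
    subst hxy
    exact ⟨rfl, (List.append_left_inj _).mp ht⟩
  · rintro ⟨hxy, hm⟩
    subst hxy
    exact ⟨rfl, by rw [← hm]⟩

-- the subrange cs[l..r] as a list (proof-only).
def pvSub (cs : List Char) (l r : Int) : List Char :=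
  (cs.drop l.toNat).take ((r + 1 - l).toNat)

-- head/last decomposition of pvSub on a nonempty range with l < r.
theorem pvSub_decomp (cs : List Char) (l r : Int) (hl : 0 ≤ l) (hlr : l < r)
    (hr : r < (cs.length : Int)) :
    pvSub cs l r = cs[l.toNat]'(by omega) :: (pvSub cs (l + 1) (r - 1) ++ [cs[r.toNat]'(by omega)]) := by
  have hln : l.toNat < cs.length := by omega
  have hrn : r.toNat < cs.length := by omega
  unfold pvSub
  rw [show (l + 1).toNat = l.toNat + 1 by omega,
      show ((r - 1) + 1 - (l + 1)).toNat = (r - l - 1).toNat by omega,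
      show (r + 1 - l).toNat = ((r - l - 1).toNat + 1) + 1 by omega,
      List.drop_eq_getElem_cons hln, List.take_succ_cons, List.take_add_one]
  congr 1
  congr 1
  rw [List.getElem?_drop, show l.toNat + 1 + (r - l - 1).toNat = r.toNat by omega,
      List.getElem?_eq_getElem hrn]
  rfl

-- the two-pointer palindrome test equals "subrange equals its own reverse".
theorem pvIsPal_eq_sub (cs : List Char) :
    ∀ (k : Nat) (l r : Int), (r + 1 - l).toNat = k → 0 ≤ l → r < (cs.length : Int) →
      pvIsPal cs l r = (pvSub cs l r == (pvSub cs l r).reverse) := by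
  intro k
  induction k using Nat.strong_induction_on with
  | _ k ih =>
    intro l r hk hl hr
    by_cases hle : l ≤ r
    · have hln : l.toNat < cs.length := by omega
      have hrn : r.toNat < cs.length := by omega
      have hgl : PySem.List.pyGet? cs l = some (cs[l.toNat]'hln) := by
        have h := PySem.List.pyGet?_natCast cs l.toNat
        rw [show ((l.toNat : Nat) : Int) = l by omega] at h
        rw [h]
        exact List.getElem?_eq_getElem hln
      have hgr : PySem.List.pyGet? cs r = some (cs[r.toNat]'hrn) := by
        have h := PySem.List.pyGet?_natCast cs r.toNat
        rw [show ((r.toNat : Nat) : Int) = r by omega] at h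
        rw [h]
        exact List.getElem?_eq_getElem hrn
      by_cases heq : l = r
      · -- middle element: always equal, one more step then done
        subst heq
        rw [pvIsPal, if_pos hle, if_neg (by simp), pvIsPal, if_neg (by omega)]
        have : pvSub cs l l = [cs[l.toNat]'hln] := by
          unfold pvSub
          rw [show (l + 1 - l).toNat = 1 by omega, List.take_one, List.head?_drop,
              List.getElem?_eq_getElem hln]
          rfl
        rw [this]
        simp
      · have hlr : l < r := by omega
        have hdec := pvSub_decomp cs l r hl hlr hr
        have hiff : (pvSub cs l r = (pvSub cs l r).reverse) ↔
            (cs[l.toNat]'hln = cs[r.toNat]'hrn ∧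
              pvSub cs (l + 1) (r - 1) = (pvSub cs (l + 1) (r - 1)).reverse) := by
          rw [hdec]; exact pal_cons_concat _ _ _
        by_cases hne : cs[l.toNat]'hln = cs[r.toNat]'hrn
        · -- matching ends: recurse
          rw [pvIsPal, if_pos hle, if_neg (by simp [hgl, hgr, hne])]
          rw [ih ((r - 1) + 1 - (l + 1)).toNat (by omega) (l + 1) (r - 1) rfl (by omega) (by omega)]
          rw [Bool.eq_iff_iff]
          simp only [beq_iff_eq]
          rw [hiff]
          constructor
          · rintro h; exact ⟨hne, h⟩
          · rintro ⟨_, h⟩; exact h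
        · -- mismatching ends: both sides false
          rw [pvIsPal, if_pos hle, if_pos (by simp [hgl, hgr]; exact hne)]
          have hnot : pvSub cs l r ≠ (pvSub cs l r).reverse :=
            fun h => hne (hiff.mp h).1
          exact (beq_eq_false_iff_ne.mpr hnot).symm
    · -- empty range
      rw [pvIsPal, if_neg hle]
      have : pvSub cs l r = [] := by
        unfold pvSub
        rw [show (r + 1 - l).toNat = 0 by omega]
        simp
      rw [this]
      simp

-- A's pair of fresh loops at symmetric pointers equals B's indexed loop.
theorem pv_main (cs : List Char) :
    ∀ (k : Nat) (i : Int), (PySem.Int.floordiv (cs.length : Int) 2 - i).toNat = k → 0 ≤ i →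
      (pvLoopFront cs i ((cs.length : Int) - 1 - i) false
        || pvLoopBack cs i ((cs.length : Int) - 1 - i) false)
        = pvLoopB cs (cs.length : Int) i := by
  intro k
  induction k using Nat.strong_induction_on with
  | _ k ih =>
    intro i hk hi
    have hfd : PySem.Int.floordiv (cs.length : Int) 2 = (cs.length : Int) / 2 :=
      PySem.Int.floordiv_eq_ediv_of_pos (by omega)
    rw [pvLoopB, hfd]
    rw [hfd] at hk
    by_cases hlt : i < (cs.length : Int) / 2
    · rw [if_pos hlt]
      have hij : i < (cs.length : Int) - 1 - i := by omega
      have hjn : (cs.length : Int) - 1 - i < (cs.length : Int) := by omega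
      by_cases hne : (PySem.List.pyGet? cs i).getD ' ' ≠
          (PySem.List.pyGet? cs ((cs.length : Int) - 1 - i)).getD ' '
      · rw [if_pos hne]
        rw [pvLoopFront, if_pos (by omega), if_pos hne, Bool.not_false, if_pos rfl,
            pvLoopFront_true]
        rw [pvLoopBack, if_pos (by omega), if_pos hne, Bool.not_false, if_pos rfl,
            pvLoopBack_true]
        rw [pvIsPal_eq_sub cs _ (i + 1) ((cs.length : Int) - 1 - i) rfl (by omega) (by omega)]
        rw [pvIsPal_eq_sub cs _ i ((cs.length : Int) - 1 - i - 1) rfl hi (by omega)]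
        have ha : PySem.List.slice cs (some (i + 1)) (some ((cs.length : Int) - 1 - i + 1))
            = pvSub cs (i + 1) ((cs.length : Int) - 1 - i) := by
          rw [PySem.List.slice_toNat cs (by omega) (by omega)]
          unfold pvSub
          congr 1
          omega
        have hb : PySem.List.slice cs (some i) (some ((cs.length : Int) - 1 - i))
            = pvSub cs i ((cs.length : Int) - 1 - i - 1) := by
          rw [PySem.List.slice_toNat cs (by omega) (by omega)]
          unfold pvSub
          congr 1
          omega
        rw [ha, hb]
      · rw [if_neg hne]
        rw [pvLoopFront, if_pos (by omega), if_neg hne]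
        rw [pvLoopBack, if_pos (by omega), if_neg hne]
        rw [show (cs.length : Int) - 1 - i - 1 = (cs.length : Int) - 1 - (i + 1) by ring]
        rw [ih ((cs.length : Int) / 2 - (i + 1)).toNat (by omega) (i + 1) (by rw [hfd]) (by omega)]
    · rw [if_neg hlt]
      by_cases hle : i ≤ (cs.length : Int) - 1 - i
      · -- only possible if i is the exact middle of an odd-length word
        have hij : (cs.length : Int) - 1 - i = i := by omega
        rw [hij]
        rw [pvLoopFront, if_pos le_rfl, if_neg (by simp), pvLoopFront, if_neg (by omega)]
        rw [pvLoopBack, if_pos le_rfl, if_neg (by simp), pvLoopBack, if_neg (by omega)]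
        rfl
      · rw [pvLoopFront, if_neg hle, pvLoopBack, if_neg hle]
        rfl

-- ===== VERDICT (by name: the statement is the Claim_ definition above) =====
theorem semipelindrom_spec : Claim_equal_semipelindrom := by
  intro word _
  unfold Spec_semipelindrom semipelindrom semipelindrom_alt
  simpa using (pv_main word.toList _ 0 rfl le_rfl)
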